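-- pv_equiv track=rewrite | github.com/Adarshb2000/coding | IRSTXOR.py | irstxor
-- ===== SOURCE A (Python) =====
-- from math import log2
--
-- def irstxor(c):
--     x = int(log2(c))
--
--     B = 2 ** x - 1
--
--     A1 = 2 ** x
--
--     binary = bin(c)[2 :]
--
--     A2 = 0
--
--     for index, i in enumerate(reversed(binary)):
--         if not int(i):
--             A2 += 2 ** index
--
--
--     return (A1 + A2) * B
-- ===== SOURCE B (Python) =====
-- def irstxor(c):
--     bl = c.bit_length()
--     x = bl - 1
--     mask = (1 << bl) - 1
--     return ((1 << x) + (mask - c)) * ((1 << x) - 1)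
-- ===== Notes on version B (the rewrite author's own statement) =====
-- stated objective: simpler
-- what changed: Replaced the float log2 call and the per-bit loop over the reversed binary string with a closed-form arithmetic formula: the loop's sum of 2**i over zero bits equals (2**bit_length - 1) - c, so B is three lines of shifts and subtraction with no loop.
import Mathlib
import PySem

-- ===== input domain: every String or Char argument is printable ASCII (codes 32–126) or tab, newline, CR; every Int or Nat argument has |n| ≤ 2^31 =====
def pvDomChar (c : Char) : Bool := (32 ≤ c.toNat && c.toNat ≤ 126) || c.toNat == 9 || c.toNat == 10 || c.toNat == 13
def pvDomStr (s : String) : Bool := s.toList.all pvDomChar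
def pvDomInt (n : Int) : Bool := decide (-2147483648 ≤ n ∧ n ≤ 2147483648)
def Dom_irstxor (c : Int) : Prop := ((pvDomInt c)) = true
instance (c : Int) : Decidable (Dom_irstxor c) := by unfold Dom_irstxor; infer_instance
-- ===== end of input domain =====

-- B replaces A's float log2 and per-bit loop by a closed-form arithmetic formula (simpler; no loop).

-- ===== PORT A =====
-- bits of n, least significant first (the loop in A iterates over reversed(bin(c)[2:]))
def pvBitsLSB (n : Nat) : List Nat :=
  if n = 0 then [] else n % 2 :: pvBitsLSB (n / 2)
decreasing_by exact Nat.div_lt_self (Nat.pos_of_ne_zero (by assumption)) (by omega)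

-- bin(c)[2:] as a list of digits, most significant first (hand port; exact for c ≥ 0)
def pvBinDigits (n : Nat) : List Nat :=
  if n = 0 then [0] else (pvBitsLSB n).reverse

-- the for loop: `for index, i in enumerate(reversed(binary)): if not int(i): A2 += 2 ** index`
def pvLoop : List Nat → Nat → Int → Int
  | [], _, a2 => a2
  | d :: ds, idx, a2 => pvLoop ds (idx + 1) (if d = 0 then a2 + 2 ^ idx else a2)

def irstxor (c : Int) : Int :=
  -- int(log2(c)) hand-ported as Nat.log 2: exact on Pre_ ∩ Dom_ (1 ≤ c ≤ 2^31, where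
  -- the correctly-rounded double log2 never crosses an integer and int() truncates = floor)
  let x : Nat := Nat.log 2 c.toNat
  let B : Int := 2 ^ x - 1
  let A1 : Int := 2 ^ x
  let binary : List Nat := pvBinDigits c.toNat
  let A2 : Int := pvLoop binary.reverse 0 0
  (A1 + A2) * B

-- ===== PORT B =====
def irstxor_alt (c : Int) : Int :=
  -- c.bit_length() hand-ported: bit length of |c|, exact for every int
  let bl : Nat := if c = 0 then 0 else Nat.log 2 c.natAbs + 1
  let x : Nat := bl - 1
  let mask : Int := 2 ^ bl - 1
  (2 ^ x + (mask - c)) * (2 ^ x - 1)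

-- ===== PRECONDITION & SPEC =====
-- A calls log2(c), which raises ValueError for c ≤ 0; Pre_ excludes exactly those inputs.
def Pre_irstxor (c : Int) : Prop := 1 ≤ c
instance (c : Int) : Decidable (Pre_irstxor c) := by unfold Pre_irstxor; infer_instance
def pvWitness_irstxor : Int := 6

def Spec_irstxor (c : Int) (out : Int) : Prop := out = irstxor_alt c
instance (c : Int) (out : Int) : Decidable (Spec_irstxor c out) := by unfold Spec_irstxor; infer_instance

-- ===== CLAIM (what is proved, stated in full; the proofs are below) =====
def Claim_equal_irstxor : Prop := ∀ (c : Int), Dom_irstxor c → Pre_irstxor c → Spec_irstxor c (irstxor c)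

-- ===== LEMMAS AND PROOFS =====
theorem pvBitsLSB_len_log (n : Nat) (h : 1 ≤ n) :
    (pvBitsLSB n).length = Nat.log 2 n + 1 := by
  induction n using Nat.strong_induction_on with
  | _ n ih =>
    rw [pvBitsLSB]
    simp only [if_neg (by omega : ¬ n = 0), List.length_cons]
    by_cases h2 : n / 2 = 0
    · have : n = 1 := by omega
      subst this
      simp [pvBitsLSB, Nat.log_one_right]
    · rw [ih (n / 2) (Nat.div_lt_self (by omega) (by omega)) (by omega)]
      have := Nat.log_div_base 2 n
      have h2n : 2 ≤ n := by omega
      have : 1 ≤ Nat.log 2 n := Nat.log_pos (by omega) h2n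
      omega

theorem pvLoop_eval (n : Nat) : ∀ (k : Nat) (a : Int),
    pvLoop (pvBitsLSB n) k a = a + 2 ^ k * (2 ^ (pvBitsLSB n).length - 1 - (n : Int)) := by
  induction n using Nat.strong_induction_on with
  | _ n ih =>
    intro k a
    by_cases h : n = 0
    · subst h; simp [pvBitsLSB, pvLoop]
    · rw [pvBitsLSB, if_neg h]
      have hrec : n / 2 < n := Nat.div_lt_self (by omega) (by omega)
      have hmod : n % 2 = 0 ∨ n % 2 = 1 := by omega
      have hn : (n : Int) = 2 * ((n / 2 : Nat) : Int) + ((n % 2 : Nat) : Int) := by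
        push_cast; omega
      rcases hmod with hm | hm <;>
        simp only [pvLoop, hm, List.length_cons, if_pos, one_ne_zero,
          reduceIte] <;>
        rw [ih (n / 2) hrec] <;>
        rw [hn, hm] <;> push_cast <;> ring
theorem irstxor_spec_aux (c : Int) (h : 1 ≤ c) : irstxor c = irstxor_alt c := by
  unfold irstxor irstxor_alt
  have hc0 : ¬ c = 0 := by omega
  have hcn : (1 : Nat) ≤ c.toNat := by omega
  have habs : c.natAbs = c.toNat := by omega
  have hcast : ((c.toNat : Nat) : Int) = c := by omega
  simp only [pvBinDigits, if_neg (by omega : ¬ c.toNat = 0), List.reverse_reverse,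
    if_neg hc0, habs]
  rw [pvLoop_eval, pvBitsLSB_len_log c.toNat hcn, hcast]
  have : Nat.log 2 c.toNat + 1 - 1 = Nat.log 2 c.toNat := by omega
  rw [this]
  ring

-- ===== VERDICT (by name: the statement is the Claim_ definition above) =====
theorem irstxor_spec : Claim_equal_irstxor := by
  intro c _ hpre
  exact irstxor_spec_aux c hpre
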